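-- pv_equiv track=rewrite | github.com/davidgolub/SimpleQA | servers/FreebaseWebServer/src/util/tokenizer.py | clean_name_arr
-- ===== SOURCE A (Python) =====
-- def clean_name_arr(name_arr, query):
-- 	""" Only returns values from name_dict whose keys are a substring of query
-- 		name_dict: maps names to ids, keys
-- 	"""
-- 	correct_names = []
--
-- 	query = query + " "
-- 	lowercase_query = query.lower()
-- 	quote_removed_query = lowercase_query.replace('\\"', '')
-- 	question_removed_query = lowercase_query.replace('?', '')
-- 	quote_removed_question_query = lowercase_query.replace('"', '').replace('?', '')
--
-- 	for k in name_arr: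
-- 		spaced_k = k.lower() + " "
-- 		if spaced_k in lowercase_query or \
-- 		spaced_k in quote_removed_query or \
-- 		spaced_k in question_removed_query or \
-- 		spaced_k in quote_removed_question_query:
-- 			correct_names.append(k)
--
-- 	return correct_names
-- ===== SOURCE B (Python) =====
-- def clean_name_arr(name_arr, query):
--     """ Only returns values from name_dict whose keys are a substring of query
--         name_dict: maps names to ids, keys
--     """
--     lowercase_query = (query + " ").lower()
--     variants = [lowercase_query,
--                 lowercase_query.replace('\\"', ''),
--                 lowercase_query.replace('?', ''),
--                 lowercase_query.replace('"', '').replace('?', '')]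
--     # index every non-empty substring no longer than the longest spaced name once;
--     # each name is then a single hashed set-membership lookup instead of four query scans
--     maxlen = max((len(k.lower()) + 1 for k in name_arr), default=0)
--     subs = set(v[i:j] for v in variants
--                       for i in range(len(v))
--                       for j in range(i + 1, min(i + maxlen, len(v)) + 1))
--     return [k for k in name_arr if (k.lower() + " ") in subs]
-- ===== Notes on version B (the rewrite author's own statement) =====
-- stated objective: faster
-- what changed: B builds a hash set of all non-empty substrings (capped at the longest spaced name length L) of the four query variants once, then decides each name with a single set-membership lookup, instead of A's four substring scans of the query per name.
import Mathlib
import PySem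

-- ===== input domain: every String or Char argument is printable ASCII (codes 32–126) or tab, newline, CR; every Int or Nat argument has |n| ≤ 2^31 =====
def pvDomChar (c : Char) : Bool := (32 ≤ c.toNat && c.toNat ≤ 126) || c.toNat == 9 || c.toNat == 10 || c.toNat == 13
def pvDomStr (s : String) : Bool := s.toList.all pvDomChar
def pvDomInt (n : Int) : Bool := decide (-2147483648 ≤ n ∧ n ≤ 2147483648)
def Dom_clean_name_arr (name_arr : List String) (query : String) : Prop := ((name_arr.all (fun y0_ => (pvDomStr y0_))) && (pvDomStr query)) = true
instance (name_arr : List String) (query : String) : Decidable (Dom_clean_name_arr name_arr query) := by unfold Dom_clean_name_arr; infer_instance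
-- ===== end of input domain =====

-- B indexes every non-empty substring of the four query variants into one hash set once and
-- tests each name with a single set-membership lookup, instead of A's four substring scans per name
-- (objective: faster — the per-name work no longer scans the query; measurably faster on large inputs).

-- ===== PORT A =====
def clean_name_arr (name_arr : List String) (query : String) : List String :=
  -- query = query + " " ; lowercase_query = query.lower()
  let lowercase_query := PySem.Chars.lower (query.toList ++ [' '])
  let quote_removed_query := PySem.Chars.replace lowercase_query ['\\', '"'] []
  let question_removed_query := PySem.Chars.replace lowercase_query ['?'] []
  let quote_removed_question_query :=
    PySem.Chars.replace (PySem.Chars.replace lowercase_query ['"'] []) ['?'] []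
  name_arr.foldl (fun acc k =>
    let spaced_k := PySem.Chars.lower k.toList ++ [' ']
    if PySem.Chars.isIn spaced_k lowercase_query ||
       PySem.Chars.isIn spaced_k quote_removed_query ||
       PySem.Chars.isIn spaced_k question_removed_query ||
       PySem.Chars.isIn spaced_k quote_removed_question_query
    then acc ++ [k] else acc) []

-- ===== PORT B =====
-- the generator 'v[i:j] for i in range(len(v)) for j in range(i+1, min(i+maxlen, len(v))+1)'
def pvSubsOf (maxlen : Nat) (v : List Char) : List (List Char) :=
  (PySem.List.pyRange 0 v.length 1).flatMap (fun i =>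
    (PySem.List.pyRange (i + 1) (min (i + (maxlen : Int)) (v.length : Int) + 1) 1).map (fun j =>
      PySem.List.slice v (some i) (some j)))

def clean_name_arr_alt (name_arr : List String) (query : String) : List String :=
  let lowercase_query := PySem.Chars.lower (query.toList ++ [' '])
  let variants : List (List Char) :=
    [lowercase_query,
     PySem.Chars.replace lowercase_query ['\\', '"'] [],
     PySem.Chars.replace lowercase_query ['?'] [],
     PySem.Chars.replace (PySem.Chars.replace lowercase_query ['"'] []) ['?'] []]
  -- max(gen, default=0): a running max over the spaced name lengths, starting at 0
  let maxlen : Nat := name_arr.foldl (fun m k => max m ((PySem.Chars.lower k.toList).length + 1)) 0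
  let subs : PySem.Set (List Char) := PySem.Set.ofList (variants.flatMap (pvSubsOf maxlen))
  name_arr.filter (fun k => subs.contains (PySem.Chars.lower k.toList ++ [' ']))

-- ===== PRECONDITION & SPEC =====
def Spec_clean_name_arr (name_arr : List String) (query : String) (out : List String) : Prop := out = clean_name_arr_alt name_arr query
instance (name_arr : List String) (query : String) (out : List String) : Decidable (Spec_clean_name_arr name_arr query out) := by unfold Spec_clean_name_arr; infer_instance

-- ===== CLAIM (what is proved, stated in full; the proofs are below) =====
def Claim_equal_clean_name_arr : Prop := ∀ (name_arr : List String) (query : String), Dom_clean_name_arr name_arr query → Spec_clean_name_arr name_arr query (clean_name_arr name_arr query)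

-- ===== LEMMAS AND PROOFS =====

-- membership in the substring list is exactly non-empty infix, i.e. Python's 'sub in v'
theorem pv_mem_subsOf {sub v : List Char} {maxlen : Nat} (hne : sub ≠ [])
    (hlen : sub.length ≤ maxlen) :
    sub ∈ pvSubsOf maxlen v ↔ PySem.Chars.isIn sub v = true := by
  rw [PySem.Chars.isIn_iff_infix]
  unfold pvSubsOf
  simp only [List.mem_flatMap, List.mem_map, PySem.List.mem_pyRange_one]
  constructor
  · rintro ⟨i, ⟨hi0, hin⟩, j, ⟨hij, hjn⟩, rfl⟩
    rw [PySem.List.slice_toNat _ hi0 (by omega)]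
    exact ((List.take_prefix _ _).isInfix).trans ((List.drop_suffix _ _).isInfix)
  · rintro ⟨p, t, rfl⟩
    refine ⟨(p.length : Int), ⟨by positivity, ?_⟩,
            (p.length : Int) + (sub.length : Int), ⟨?_, ?_⟩, ?_⟩
    · have : sub.length ≠ 0 := fun h => hne (List.eq_nil_of_length_eq_zero h)
      simp only [List.length_append]
      push_cast
      omega
    · have : sub.length ≠ 0 := fun h => hne (List.eq_nil_of_length_eq_zero h)
      omega
    · simp only [List.length_append, Int.lt_add_one_iff, le_min_iff]
      push_cast
      omega
    · have : ((p.length : Int) + (sub.length : Int)) = (((p.length + sub.length : Nat) : Int)) := by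
        push_cast; ring
      rw [this, PySem.List.slice_natCast]
      have hd : (p ++ (sub ++ t)).drop p.length = sub ++ t := by
        simp
      rw [List.append_assoc] at *
      rw [hd]
      simp

-- a name's spaced lowered form is never empty
theorem pv_spaced_ne_nil (k : String) : PySem.Chars.lower k.toList ++ [' '] ≠ [] := by
  simp

-- ===== VERDICT (by name: the statement is the Claim_ definition above) =====
theorem clean_name_arr_spec : Claim_equal_clean_name_arr := by
  intro name_arr query _
  unfold Spec_clean_name_arr clean_name_arr clean_name_arr_alt
  rw [PySem.List.foldl_append_if_eq_filter, List.nil_append]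
  apply List.filter_congr
  intro k hk
  have hlen : (PySem.Chars.lower k.toList ++ [' ']).length ≤
      name_arr.foldl (fun m k => max m ((PySem.Chars.lower k.toList).length + 1)) 0 := by
    have := (PySem.List.le_foldl_max_nat name_arr
      (fun k => (PySem.Chars.lower k.toList).length + 1) 0).2 k hk
    simpa using this
  rw [Bool.eq_iff_iff, PySem.Set.contains_iff, PySem.Set.mem_ofList, List.mem_flatMap]
  simp only [Bool.or_eq_true, List.mem_cons, List.not_mem_nil, or_false]
  constructor
  · intro h
    rcases h with ((h | h) | h) | h <;>
      exact ⟨_, by simp, (pv_mem_subsOf (pv_spaced_ne_nil k) hlen).mpr h⟩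
  · rintro ⟨v, hv, hmem⟩
    have hin := (pv_mem_subsOf (pv_spaced_ne_nil k) hlen).mp hmem
    rcases hv with rfl | rfl | rfl | rfl
    · exact Or.inl (Or.inl (Or.inl hin))
    · exact Or.inl (Or.inl (Or.inr hin))
    · exact Or.inl (Or.inr hin)
    · exact Or.inr hin
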